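-- pv_equiv track=rewrite | github.com/sun-hainan/Python | 编码理论/bch_code.py | decode_bch_15_7
-- ===== SOURCE A (Python) =====
-- from typing import List, Tuple, Optional
--
-- def polynomial_divide(dividend: List[int], divisor: List[int]) -> List[int]:
--
--     """多项式除法"""
--
--     dividend = dividend.copy()
--
--     divisor_degree = len(divisor) - 1
--
--
--
--     for i in range(len(dividend) - divisor_degree):
--
--         if dividend[i]:
--
--             for j in range(1, len(divisor)):
--
--                 dividend[i + j] ^= divisor[j]
--
--
--
--     return dividend[len(dividend) - divisor_degree:]
--
-- def decode_bch_15_7(code: int) -> Tuple[int, int]: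
--
--     """
--
--     (15, 7) BCH码解码
--
--
--
--     Args:
--
--         code: 15位码字
--
--
--
--     Returns:
--
--         (解码后的7位数据, 错误数)
--
--     """
--
--     # 提取码字位
--
--     bits = [(code >> i) & 1 for i in range(15)]
--
--
--
--     # 校验多项式
--
--     g = [1, 0, 0, 1, 1, 0, 1, 0, 1]  # 生成多项式
--
--
--
--     # 计算余式
--
--     remainder = polynomial_divide(bits.copy(), g)
--
--
--
--     # 错误数
--
--     errors = sum(remainder)
--
--
--
--     # 提取信息位
--
--     info_bits = bits[:7]
--
--     data = sum(info_bits[i] << i for i in range(7))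
--
--
--
--     return data, errors
-- ===== SOURCE B (Python) =====
-- def decode_bch_15_7(code: int):
--     # CRC-style shift register over the 15 code bits (bit 0 fed first as the
--     # highest-degree term); errors = Hamming weight of the final remainder.
--     G = 0b100110101
--     reg = 0
--     for i in range(15):
--         reg = (reg << 1) | ((code >> i) & 1)
--         if reg & 0x100:
--             reg ^= G
--     return code % 128, reg.bit_count()
-- ===== Notes on version B (the rewrite author's own statement) =====
-- stated objective: alternative
-- what changed: Replaces the per-bit info extraction loop by the closed form code % 128 and the array-based polynomial long-division helper by an 8-bit CRC shift register fed the 15 code bits in one pass, counting errors as the popcount of the final register.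
import Mathlib
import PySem

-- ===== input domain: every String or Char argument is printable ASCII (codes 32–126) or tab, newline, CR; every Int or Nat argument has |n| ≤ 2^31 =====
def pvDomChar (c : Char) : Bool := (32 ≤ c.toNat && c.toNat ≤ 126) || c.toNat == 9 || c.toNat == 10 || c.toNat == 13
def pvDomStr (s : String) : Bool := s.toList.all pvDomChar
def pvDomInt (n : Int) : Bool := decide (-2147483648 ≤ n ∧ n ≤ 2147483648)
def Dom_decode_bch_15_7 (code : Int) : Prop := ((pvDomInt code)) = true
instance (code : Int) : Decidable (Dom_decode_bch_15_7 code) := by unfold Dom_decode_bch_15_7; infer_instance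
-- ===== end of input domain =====

-- B replaces the per-bit info extraction loop by the closed form code % 128 and
-- the array long-division helper by a one-pass 8-bit CRC shift register whose
-- popcount is the error count (alternative decomposition, same cost).

-- ===== PORT A =====
def polynomial_divide (dividend divisor : List Int) : List Int :=
  let divisor_degree : Int := PySem.List.len divisor - 1
  let dividend :=
    (PySem.List.pyRange 0 (PySem.List.len dividend - divisor_degree) 1).foldl
      (fun dv i =>
        if PySem.List.pyGetD dv i 0 ≠ 0 then
          (PySem.List.pyRange 1 (PySem.List.len divisor) 1).foldl
            (fun dv j =>
              PySem.List.pySetD dv (i + j)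
                (PySem.Int.bxor (PySem.List.pyGetD dv (i + j) 0) (PySem.List.pyGetD divisor j 0)))
            dv
        else dv)
      dividend
  PySem.List.slice dividend (some (PySem.List.len dividend - divisor_degree)) none

def decode_bch_15_7 (code : Int) : Int × Int :=
  let bits := (PySem.List.pyRange 0 15 1).map
    ((fun i => PySem.Int.band (code >>> i.toNat) 1) : Int → Int)
  let g : List Int := [1, 0, 0, 1, 1, 0, 1, 0, 1]
  let remainder := polynomial_divide bits g
  let errors := remainder.sum
  let info_bits := PySem.List.slice bits none (some 7)
  let data := (PySem.List.pyRange 0 7 1).foldl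
    ((fun s i => s + (PySem.List.pyGetD info_bits i 0) <<< i.toNat) : Int → Int → Int) 0
  (data, errors)

-- ===== PORT B =====
def decode_bch_15_7_alt (code : Int) : Int × Int :=
  let g : Int := 0b100110101
  let reg := (PySem.List.pyRange 0 15 1).foldl
    (fun (reg : Int) (i : Int) =>
      let reg : Int := PySem.Int.bor (reg <<< (1 : Nat)) (PySem.Int.band (code >>> i.toNat) 1)
      if PySem.Int.band reg 0x100 ≠ 0 then PySem.Int.bxor reg g else reg) (0 : Int)
  (PySem.Int.mod code 128, (PySem.Int.bitCount reg : Int))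

-- ===== PRECONDITION & SPEC =====
def Spec_decode_bch_15_7 (code : Int) (out : Int × Int) : Prop := out = decode_bch_15_7_alt code
instance (code : Int) (out : Int × Int) : Decidable (Spec_decode_bch_15_7 code out) := by unfold Spec_decode_bch_15_7; infer_instance

-- ===== CLAIM (what is proved, stated in full; the proofs are below) =====
def Claim_equal_decode_bch_15_7 : Prop := ∀ (code : Int), Dom_decode_bch_15_7 code → Spec_decode_bch_15_7 code (decode_bch_15_7 code)

-- ===== LEMMAS AND PROOFS =====

-- the generator polynomial and its tail g[1..8]
def pvG : List Int := [1, 0, 0, 1, 1, 0, 1, 0, 1]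
def pvGT : List Int := [0, 0, 1, 1, 0, 1, 0, 1]

-- one outer-loop iteration of A's polynomial_divide (with divisor pvG)
def pvStepA (dv : List Int) (i : Int) : List Int :=
  if PySem.List.pyGetD dv i 0 ≠ 0 then
    (PySem.List.pyRange 1 (PySem.List.len pvG) 1).foldl
      (fun dv j =>
        PySem.List.pySetD dv (i + j)
          (PySem.Int.bxor (PySem.List.pyGetD dv (i + j) 0) (PySem.List.pyGetD pvG j 0)))
      dv
  else dv

-- one step of B's shift register
def pvStepB (reg b : Int) : Int :=
  let t : Int := PySem.Int.bor (reg <<< (1 : Nat)) b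
  if PySem.Int.band t 0x100 ≠ 0 then PySem.Int.bxor t 0b100110101 else t

-- the 8 bits of a register, highest degree first
def pvUnpack8 (r : Int) : List Int :=
  [PySem.Int.band (r >>> (7 : Nat)) 1, PySem.Int.band (r >>> (6 : Nat)) 1,
   PySem.Int.band (r >>> (5 : Nat)) 1, PySem.Int.band (r >>> (4 : Nat)) 1,
   PySem.Int.band (r >>> (3 : Nat)) 1, PySem.Int.band (r >>> (2 : Nat)) 1,
   PySem.Int.band (r >>> (1 : Nat)) 1, PySem.Int.band (r >>> (0 : Nat)) 1]

-- B's step on a Nat register, as a Nat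
def pvNStep (rn : Nat) (bb : Bool) : Nat := (pvStepB (rn : Int) (cond bb 1 0)).toNat

-- effect of A's head reduction on the tail of the dividend
def pvHeadRed (x : Int) (xs : List Int) : List Int :=
  if x ≠ 0 then List.zipWith PySem.Int.bxor (xs.take 8) pvGT ++ xs.drop 8 else xs

theorem pv_getD_cons_succ (x : Int) (xs : List Int) (i : Int) (d : Int) (hi : 0 ≤ i) :
    PySem.List.pyGetD (x :: xs) (i + 1) d = PySem.List.pyGetD xs i d := by
  rw [PySem.List.pyGetD_of_nonneg _ _ (by omega), PySem.List.pyGetD_of_nonneg _ _ hi]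
  have h : (i + 1).toNat = i.toNat + 1 := by omega
  rw [h]; rfl

theorem pv_setD_cons_succ (x : Int) (xs : List Int) (i : Int) (v : Int) (hi : 0 ≤ i) :
    PySem.List.pySetD (x :: xs) (i + 1) v = x :: PySem.List.pySetD xs i v := by
  rw [PySem.List.pySetD_of_nonneg _ _ (by omega), PySem.List.pySetD_of_nonneg _ _ hi]
  have h : (i + 1).toNat = i.toNat + 1 := by omega
  rw [h]; rfl

theorem pv_pd_eq (d : List Int) :
    polynomial_divide d pvG =
      PySem.List.slice ((PySem.List.pyRange 0 (PySem.List.len d - 8) 1).foldl pvStepA d)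
        (some (PySem.List.len ((PySem.List.pyRange 0 (PySem.List.len d - 8) 1).foldl pvStepA d) - 8)) none := by
  have h8 : PySem.List.len pvG - 1 = 8 := by decide
  simp only [polynomial_divide, h8]
  rfl

theorem pv_inner_shift (i : Int) (hi : 0 ≤ i) :
    ∀ (js : List Int), (∀ j ∈ js, 1 ≤ j) → ∀ (x : Int) (c : List Int),
      js.foldl (fun dv j =>
          PySem.List.pySetD dv (i + 1 + j)
            (PySem.Int.bxor (PySem.List.pyGetD dv (i + 1 + j) 0) (PySem.List.pyGetD pvG j 0))) (x :: c)
        = x :: js.foldl (fun dv j =>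
            PySem.List.pySetD dv (i + j)
              (PySem.Int.bxor (PySem.List.pyGetD dv (i + j) 0) (PySem.List.pyGetD pvG j 0))) c := by
  intro js
  induction js with
  | nil => intro _ x c; rfl
  | cons j js ih =>
    intro hjs x c
    have hj : 1 ≤ j := hjs j (by simp)
    simp only [List.foldl_cons]
    have e : i + 1 + j = (i + j) + 1 := by ring
    rw [e, pv_getD_cons_succ _ _ _ _ (by omega), pv_setD_cons_succ _ _ _ _ (by omega)]
    exact ih (fun j' hm => hjs j' (by simp [hm])) x _

theorem pv_stepA_cons (x : Int) (xs : List Int) (i : Int) (hi : 0 ≤ i) :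
    pvStepA (x :: xs) (i + 1) = x :: pvStepA xs i := by
  unfold pvStepA
  rw [pv_getD_cons_succ x xs i 0 hi]
  by_cases hc : PySem.List.pyGetD xs i 0 ≠ 0
  · simp only [if_pos hc]
    have hmem : ∀ j ∈ PySem.List.pyRange 1 (PySem.List.len pvG) 1, (1 : Int) ≤ j := by
      intro j hj
      have := (PySem.List.mem_pyRange_one).mp hj
      omega
    exact pv_inner_shift i hi _ hmem x xs
  · simp only [if_neg hc]

theorem pv_foldl_shift (n : Nat) :
    ∀ (a : Int) (x : Int) (xs : List Int), 0 ≤ a →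
      (PySem.List.pyRange (a + 1) (a + n + 1) 1).foldl pvStepA (x :: xs)
        = x :: (PySem.List.pyRange a (a + n) 1).foldl pvStepA xs := by
  induction n with
  | zero =>
    intro a x xs _
    rw [PySem.List.pyRange_one_eq_nil (by push_cast; omega),
        PySem.List.pyRange_one_eq_nil (by push_cast; omega)]
    rfl
  | succ n ih =>
    intro a x xs ha
    rw [PySem.List.pyRange_one_cons (by push_cast; omega),
        PySem.List.pyRange_one_cons (a := a) (by push_cast; omega)]
    simp only [List.foldl_cons]
    rw [pv_stepA_cons x xs a ha]
    have e1 : a + ((n : Int) + 1) + 1 = (a + 1) + n + 1 := by ring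
    have e2 : a + ((n : Int) + 1) = (a + 1) + n := by ring
    push_cast
    rw [e1, e2]
    exact ih (a + 1) x (pvStepA xs a) (by omega)

theorem pv_stepA_len (dv : List Int) (i : Int) : (pvStepA dv i).length = dv.length := by
  unfold pvStepA
  split
  · have : ∀ (js : List Int) (c : List Int),
        (js.foldl (fun dv j =>
          PySem.List.pySetD dv (i + j)
            (PySem.Int.bxor (PySem.List.pyGetD dv (i + j) 0) (PySem.List.pyGetD pvG j 0))) c).length = c.length := by
      intro js
      induction js with
      | nil => intro c; rfl
      | cons j js ih => intro c; simp [List.foldl_cons, ih, PySem.List.length_pySetD]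
    exact this _ _
  · rfl

theorem pv_foldl_stepA_len (js : List Int) (dv : List Int) :
    (js.foldl pvStepA dv).length = dv.length := by
  induction js generalizing dv with
  | nil => rfl
  | cons j js ih => simp [List.foldl_cons, ih, pv_stepA_len]

theorem pv_pd_len8 (l : List Int) (h : l.length = 8) : polynomial_divide l pvG = l := by
  rw [pv_pd_eq]
  have h0 : PySem.List.len l - 8 = 0 := by simp [PySem.List.len_eq, h]
  rw [h0, PySem.List.pyRange_one_eq_nil (by omega)]
  simp [List.foldl_nil, PySem.List.len_eq, h, PySem.List.slice_zero_start, PySem.List.slice_none_none]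

theorem pv_headRed_len (x : Int) (xs : List Int) (h : 8 ≤ xs.length) :
    (pvHeadRed x xs).length = xs.length := by
  unfold pvHeadRed
  split
  · simp [List.length_zipWith, List.length_take, List.length_drop, pvGT]
    omega
  · rfl

theorem pv_stepA_zero (x : Int) (xs : List Int) (h : 8 ≤ xs.length) :
    pvStepA (x :: xs) 0 = x :: pvHeadRed x xs := by
  rcases xs with _ | ⟨a1, _ | ⟨a2, _ | ⟨a3, _ | ⟨a4, _ | ⟨a5, _ | ⟨a6, _ | ⟨a7, _ | ⟨a8, rest⟩⟩⟩⟩⟩⟩⟩⟩ <;>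
    first
    | (exfalso; simp at h; done)
    | skip
  have h9 : PySem.List.pyRange 1 (PySem.List.len pvG) 1 = [1, 2, 3, 4, 5, 6, 7, 8] := by decide
  unfold pvStepA pvHeadRed
  rw [h9]
  simp only [PySem.List.pyGetD_zero_cons]
  by_cases hx : x = 0
  · subst hx
    rw [if_neg (fun hh => hh rfl), if_neg (fun hh => hh rfl)]
  · rw [if_pos hx, if_pos hx]
    simp only [List.foldl_cons, List.foldl_nil]
    simp [zero_add, PySem.List.pyGetD_ofNat', PySem.List.pySetD_of_nonneg,
      show ((1 : Int)).toNat = 1 from rfl, show ((2 : Int)).toNat = 2 from rfl,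
      show ((3 : Int)).toNat = 3 from rfl, show ((4 : Int)).toNat = 4 from rfl,
      show ((5 : Int)).toNat = 5 from rfl, show ((6 : Int)).toNat = 6 from rfl,
      show ((7 : Int)).toNat = 7 from rfl, show ((8 : Int)).toNat = 8 from rfl,
      List.set, List.getD, pvG, pvGT]

theorem pv_headRed_append (x : Int) (p rest : List Int) (hp : p.length = 8) :
    pvHeadRed x (p ++ rest) =
      (if x ≠ 0 then List.zipWith PySem.Int.bxor p pvGT else p) ++ rest := by
  unfold pvHeadRed
  have ht : (p ++ rest).take 8 = p := by rw [← hp]; exact List.take_left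
  have hd : (p ++ rest).drop 8 = rest := by rw [← hp]; exact List.drop_left
  rw [ht, hd]
  split <;> rfl

theorem pv_pd_cons (x : Int) (xs : List Int) (h : 8 ≤ xs.length) :
    polynomial_divide (x :: xs) pvG = polynomial_divide (pvHeadRed x xs) pvG := by
  rw [pv_pd_eq, pv_pd_eq]
  set N : Int := (xs.length : Int) with hN
  have hlen1 : PySem.List.len (x :: xs) = N + 1 := by simp [PySem.List.len_eq, hN]
  have hlenh : PySem.List.len (pvHeadRed x xs) = N := by
    simp [PySem.List.len_eq, pv_headRed_len x xs h, hN]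
  have hNge : (8 : Int) ≤ N := by simp [hN]; exact_mod_cast h
  rw [hlen1, hlenh]
  have e1 : N + 1 - 8 = N - 8 + 1 := by ring
  rw [e1]
  rw [PySem.List.pyRange_one_cons (by omega)]
  simp only [List.foldl_cons]
  rw [pv_stepA_zero x xs h]
  set n : Nat := (N - 8).toNat with hn
  have e3 : N - 8 + 1 = 0 + (n : Int) + 1 := by omega
  rw [e3]
  rw [pv_foldl_shift n 0 x (pvHeadRed x xs) (le_refl 0)]
  have e4 : (0 : Int) + (n : Int) = N - 8 := by omega
  rw [e4]
  set F := (PySem.List.pyRange 0 (N - 8) 1).foldl pvStepA (pvHeadRed x xs) with hFdef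
  have hlF : (F.length : Int) = N := by
    rw [hFdef, pv_foldl_stepA_len]
    simp [pv_headRed_len x xs h, hN]
  rw [PySem.List.len_eq, PySem.List.len_eq]
  simp only [List.length_cons]
  have e5 : ((F.length + 1 : Nat) : Int) - 8 = N - 7 := by omega
  have e6 : (F.length : Int) - 8 = N - 8 := by omega
  rw [e5, e6]
  rw [PySem.List.slice_from _ (by omega), PySem.List.slice_from _ (by omega)]
  have e7 : (N - 7).toNat = (N - 8).toNat + 1 := by omega
  rw [e7, List.drop_succ_cons]

theorem pv_pd_zero_cons (xs : List Int) (h : 8 ≤ xs.length) :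
    polynomial_divide ((0 : Int) :: xs) pvG = polynomial_divide xs pvG := by
  have hz : pvHeadRed 0 xs = xs := by simp [pvHeadRed]
  rw [pv_pd_cons 0 xs h, hz]

set_option maxRecDepth 8192 in
theorem pv_finite_step : ∀ rn : Nat, rn < 256 → ∀ bb : Bool,
    pvStepB (rn : Int) (cond bb 1 0) = ((pvNStep rn bb : Nat) : Int) ∧ pvNStep rn bb < 256 := by
  decide

set_option maxRecDepth 8192 in
theorem pv_finite_red : ∀ rn : Nat, rn < 256 → ∀ bb : Bool,
    (if PySem.Int.band ((rn : Int) >>> (7 : Nat)) 1 ≠ 0 then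
        List.zipWith PySem.Int.bxor ((pvUnpack8 (rn : Int)).tail ++ [cond bb 1 0]) pvGT
      else (pvUnpack8 (rn : Int)).tail ++ [cond bb 1 0])
      = pvUnpack8 ((pvNStep rn bb : Nat) : Int) := by
  decide

set_option maxRecDepth 8192 in
theorem pv_finite_sum : ∀ rn : Nat, rn < 256 →
    (pvUnpack8 (rn : Int)).sum = (PySem.Int.bitCount (rn : Int) : Int) := by
  decide

theorem pv_crc : ∀ (d : List Int), (∀ y ∈ d, y = 0 ∨ y = 1) →
    ∀ (rn : Nat), rn < 256 →
      (∃ rn' : Nat, rn' < 256 ∧ List.foldl pvStepB (rn : Int) d = (rn' : Int)) ∧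
      pvUnpack8 (List.foldl pvStepB (rn : Int) d) = polynomial_divide (pvUnpack8 (rn : Int) ++ d) pvG := by
  intro d
  induction d with
  | nil =>
    intro _ rn h
    refine ⟨⟨rn, h, rfl⟩, ?_⟩
    simp only [List.foldl_nil, List.append_nil]
    exact (pv_pd_len8 _ (by simp [pvUnpack8])).symm
  | cons b rest ih =>
    intro hd rn h
    have hrest : ∀ y ∈ rest, y = 0 ∨ y = 1 := fun y hy => hd y (List.mem_cons_of_mem _ hy)
    have key : ∀ bb : Bool,
        (∃ rn' : Nat, rn' < 256 ∧ List.foldl pvStepB (rn : Int) (cond bb 1 0 :: rest) = (rn' : Int)) ∧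
        pvUnpack8 (List.foldl pvStepB (rn : Int) (cond bb 1 0 :: rest))
          = polynomial_divide (pvUnpack8 (rn : Int) ++ cond bb 1 0 :: rest) pvG := by
      intro bb
      have h1 := pv_finite_step rn h bb
      obtain ⟨⟨rn2, hrn2, heq2⟩, hunp2⟩ := ih hrest (pvNStep rn bb) h1.2
      have hfold : List.foldl pvStepB (rn : Int) (cond bb 1 0 :: rest)
          = List.foldl pvStepB ((pvNStep rn bb : Nat) : Int) rest := by
        simp only [List.foldl_cons]
        rw [h1.1]
      constructor
      · exact ⟨rn2, hrn2, by rw [hfold]; exact heq2⟩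
      · rw [hfold, hunp2]
        -- now reduce the right-hand dividend by one head-reduction step
        have hcons : pvUnpack8 (rn : Int)
            = PySem.Int.band ((rn : Int) >>> (7 : Nat)) 1 :: (pvUnpack8 (rn : Int)).tail := rfl
        rw [hcons, List.cons_append]
        rw [pv_pd_cons _ _ (by simp [pvUnpack8])]
        have hsplit : (pvUnpack8 (rn : Int)).tail ++ cond bb 1 0 :: rest
            = ((pvUnpack8 (rn : Int)).tail ++ [cond bb 1 0]) ++ rest := by
          simp [List.append_assoc]
        rw [hsplit, pv_headRed_append _ _ _ (by simp [pvUnpack8])]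
        rw [pv_finite_red rn h bb]
    rcases hd b (List.mem_cons_self) with hb | hb <;> subst hb
    · exact key false
    · exact key true

-- ===== VERDICT (by name: the statement is the Claim_ definition above) =====
theorem pv_bits_01 (code : Int) :
    ∀ y ∈ (PySem.List.pyRange 0 15 1).map ((fun i => PySem.Int.band (code >>> i.toNat) 1) : Int → Int),
      y = 0 ∨ y = 1 := by
  intro y hy
  obtain ⟨i, -, rfl⟩ := List.mem_map.mp hy
  rw [PySem.Int.band_one]
  exact PySem.Int.mod_two_eq _

theorem pv_bits_len (code : Int) :
    ((PySem.List.pyRange 0 15 1).map ((fun i => PySem.Int.band (code >>> i.toNat) 1) : Int → Int)).length = 15 := by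
  simp [PySem.List.length_pyRange_one]

theorem pv_errors (code : Int) :
    (polynomial_divide ((PySem.List.pyRange 0 15 1).map ((fun i => PySem.Int.band (code >>> i.toNat) 1) : Int → Int)) pvG).sum
      = (PySem.Int.bitCount
          ((PySem.List.pyRange 0 15 1).foldl
            (fun (reg : Int) (i : Int) =>
              let reg : Int := PySem.Int.bor (reg <<< (1 : Nat)) (PySem.Int.band (code >>> i.toNat) 1)
              if PySem.Int.band reg 0x100 ≠ 0 then PySem.Int.bxor reg 0b100110101 else reg) (0 : Int)) : Int) := by
  set bits := (PySem.List.pyRange 0 15 1).map ((fun i => PySem.Int.band (code >>> i.toNat) 1) : Int → Int) with hbits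
  obtain ⟨⟨rn', hrn', heq⟩, hunp⟩ := pv_crc bits (pv_bits_01 code) 0 (by norm_num)
  have hreg : (PySem.List.pyRange 0 15 1).foldl
      (fun (reg : Int) (i : Int) =>
        let reg : Int := PySem.Int.bor (reg <<< (1 : Nat)) (PySem.Int.band (code >>> i.toNat) 1)
        if PySem.Int.band reg 0x100 ≠ 0 then PySem.Int.bxor reg 0b100110101 else reg) (0 : Int)
      = List.foldl pvStepB ((0 : Nat) : Int) bits := by
    rw [hbits]
    have haux : ∀ (l : List Int) (a : Int),
        l.foldl (fun (reg : Int) (i : Int) =>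
          let reg : Int := PySem.Int.bor (reg <<< (1 : Nat)) (PySem.Int.band (code >>> i.toNat) 1)
          if PySem.Int.band reg 0x100 ≠ 0 then PySem.Int.bxor reg 0b100110101 else reg) a
        = List.foldl pvStepB a (l.map ((fun i => PySem.Int.band (code >>> i.toNat) 1) : Int → Int)) := by
      intro l
      induction l with
      | nil => intro a; rfl
      | cons x t ih =>
        intro a
        rw [List.map_cons, List.foldl_cons, List.foldl_cons]
        exact ih (pvStepB a (PySem.Int.band (code >>> x.toNat) 1))
    exact haux _ _
  have hlenb : bits.length = 15 := by rw [hbits]; exact pv_bits_len code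
  have hzero : pvUnpack8 ((0 : Nat) : Int) = [0, 0, 0, 0, 0, 0, 0, 0] := by decide
  have hpd0 : polynomial_divide (pvUnpack8 ((0 : Nat) : Int) ++ bits) pvG = polynomial_divide bits pvG := by
    rw [hzero]
    show polynomial_divide (0 :: 0 :: 0 :: 0 :: 0 :: 0 :: 0 :: 0 :: bits) pvG = _
    rw [pv_pd_zero_cons _ (by simp [hlenb]), pv_pd_zero_cons _ (by simp [hlenb]),
        pv_pd_zero_cons _ (by simp [hlenb]), pv_pd_zero_cons _ (by simp [hlenb]),
        pv_pd_zero_cons _ (by simp [hlenb]), pv_pd_zero_cons _ (by simp [hlenb]),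
        pv_pd_zero_cons _ (by simp [hlenb]), pv_pd_zero_cons _ (by simp [hlenb])]
  rw [hreg, heq, ← hpd0, ← hunp, heq]
  exact pv_finite_sum rn' hrn'

theorem pv_data (code : Int) :
    (PySem.List.pyRange 0 7 1).foldl
      ((fun s i => s + (PySem.List.pyGetD
        (PySem.List.slice ((PySem.List.pyRange 0 15 1).map ((fun i => PySem.Int.band (code >>> i.toNat) 1) : Int → Int)) none (some 7))
        i 0) <<< i.toNat) : Int → Int → Int) 0
      = PySem.Int.mod code 128 := by
  have h15 : PySem.List.pyRange 0 15 1 = [0,1,2,3,4,5,6,7,8,9,10,11,12,13,14] := by decide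
  have h7 : PySem.List.pyRange 0 7 1 = [0,1,2,3,4,5,6] := by decide
  rw [h15, h7, PySem.List.slice_to _ (by norm_num : (0:Int) ≤ 7)]
  simp only [List.map_cons, List.map_nil,
    show ((7:Int)).toNat = 7 from rfl, show ((0:Int)).toNat = 0 from rfl,
    show ((1:Int)).toNat = 1 from rfl, show ((2:Int)).toNat = 2 from rfl,
    show ((3:Int)).toNat = 3 from rfl, show ((4:Int)).toNat = 4 from rfl,
    show ((5:Int)).toNat = 5 from rfl, show ((6:Int)).toNat = 6 from rfl,
    show ((8:Int)).toNat = 8 from rfl, show ((9:Int)).toNat = 9 from rfl,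
    show ((10:Int)).toNat = 10 from rfl, show ((11:Int)).toNat = 11 from rfl,
    show ((12:Int)).toNat = 12 from rfl, show ((13:Int)).toNat = 13 from rfl,
    show ((14:Int)).toNat = 14 from rfl,
    List.take, List.foldl_cons, List.foldl_nil, PySem.List.pyGetD_ofNat', List.getD,
    List.getElem?_cons_zero, List.getElem?_cons_succ, Option.getD_some]
  simp only [PySem.Int.band_one, PySem.Int.mod_eq_emod_of_pos (by norm_num : (0:Int) < 2),
    PySem.Int.mod_eq_emod_of_pos (by norm_num : (0:Int) < 128),
    Int.shiftRight_eq_div_pow, ← Int.shiftLeft_natCast_right, Int.shiftLeft_eq_mul_pow]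
  push_cast
  norm_num
  omega

theorem decode_bch_15_7_spec : Claim_equal_decode_bch_15_7 := by
  intro code _
  unfold Spec_decode_bch_15_7 decode_bch_15_7 decode_bch_15_7_alt
  show ((PySem.List.pyRange 0 7 1).foldl
      ((fun s i => s + (PySem.List.pyGetD
        (PySem.List.slice ((PySem.List.pyRange 0 15 1).map ((fun i => PySem.Int.band (code >>> i.toNat) 1) : Int → Int)) none (some 7))
        i 0) <<< i.toNat) : Int → Int → Int) 0,
      (polynomial_divide ((PySem.List.pyRange 0 15 1).map ((fun i => PySem.Int.band (code >>> i.toNat) 1) : Int → Int))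
        [1, 0, 0, 1, 1, 0, 1, 0, 1]).sum)
    = (PySem.Int.mod code 128,
      (PySem.Int.bitCount
        ((PySem.List.pyRange 0 15 1).foldl
          (fun (reg : Int) (i : Int) =>
            let reg : Int := PySem.Int.bor (reg <<< (1 : Nat)) (PySem.Int.band (code >>> i.toNat) 1)
            if PySem.Int.band reg 0x100 ≠ 0 then PySem.Int.bxor reg 0b100110101 else reg) (0 : Int)) : Int))
  rw [Prod.mk.injEq]
  exact ⟨pv_data code, by rw [show ([1,0,0,1,1,0,1,0,1] : List Int) = pvG from rfl]; exact pv_errors code⟩
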